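-- pv_equiv track=rewrite | github.com/AMinSC/TIL | 프로그래머스/1/17681. ［1차］ 비밀지도/［1차］ 비밀지도.py | solution
-- ===== SOURCE A (Python) =====
-- def solution(n, arr1, arr2):
--     answer = []
--     for a, b in zip(arr1, arr2):
--         bool_list = [False for _ in range(n)]
--         for i, c in enumerate(bin(a)[2:].rjust(n,'0')):
--             if int(c):
--                 bool_list[i] = True
--
--         for i, c in enumerate(bin(b)[2:].rjust(n,'0')):
--             if int(c):
--                 bool_list[i] = True
--
--         answer.append(''.join(['#' if d else ' ' for d in bool_list]))
--     return answer
-- ===== SOURCE B (Python) =====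
-- def solution(n, arr1, arr2):
--     return [''.join('#' if (a | b) >> (n - 1 - i) & 1 else ' ' for i in range(n))
--             for a, b in zip(arr1, arr2)]
-- ===== Notes on version B (the rewrite author's own statement) =====
-- stated objective: simpler
-- what changed: B replaces A's per-pair mutable bool buffer filled by two separate bin()/rjust bit-expansion passes with a single integer OR followed by a direct shift-and-mask test per output column.
-- outside the precondition, e.g. on solution(3, [8], [8]): A returns ['#  '], B returns ['   ']; on solution(1, [2], [1]): A returns ['#'], B returns ['#']
import Mathlib
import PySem

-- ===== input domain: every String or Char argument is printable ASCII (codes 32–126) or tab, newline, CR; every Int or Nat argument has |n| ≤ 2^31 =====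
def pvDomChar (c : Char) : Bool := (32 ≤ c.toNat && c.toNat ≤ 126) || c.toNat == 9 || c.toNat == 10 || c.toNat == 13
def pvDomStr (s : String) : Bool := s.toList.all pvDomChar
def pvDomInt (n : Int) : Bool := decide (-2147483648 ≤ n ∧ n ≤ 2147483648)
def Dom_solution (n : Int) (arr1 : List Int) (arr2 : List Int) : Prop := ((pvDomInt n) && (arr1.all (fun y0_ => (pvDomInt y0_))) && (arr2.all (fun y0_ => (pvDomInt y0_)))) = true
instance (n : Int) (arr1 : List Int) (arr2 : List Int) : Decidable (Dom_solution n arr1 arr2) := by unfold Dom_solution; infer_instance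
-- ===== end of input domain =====

-- B renders each row from the single integer a|b by a shift-and-mask test per column,
-- instead of A's mutable bool buffer filled by two bin()/rjust bit-expansion passes (objective: simpler).

-- ===== PORT A =====
-- s.rjust(n, '0'): left-pad with '0' to width n (no pad when n ≤ len(s))
def pvRjust (cs : List Char) (n : Int) : List Char :=
  List.replicate (n.toNat - cs.length) '0' ++ cs

-- bin(x)[2:].rjust(n, '0')
def pvBinPadded (x : Int) (n : Int) : List Char :=
  pvRjust (PySem.List.slice (PySem.Int.toBinChars0b x) (some 2) none) n

-- loop body of `for i, c in enumerate(...): if int(c): bool_list[i] = True`.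
-- `int(c)` on the '0'/'1' digits of a nonnegative bin() string is truthy iff c ≠ '0';
-- on the 'b'/'-' chars of a negative bin() string Python raises ValueError, and an index
-- i ≥ len(bool_list) raises IndexError (List.set is then a no-op) — both outside Pre_.
def pvStep (bl : List Bool) (p : Int × Char) : List Bool :=
  if p.2 ≠ '0' then bl.set p.1.toNat true else bl

def solution (n : Int) (arr1 : List Int) (arr2 : List Int) : List String :=
  (List.zip arr1 arr2).foldl (fun answer p =>
    let bl0 := List.replicate n.toNat false
    let bl1 := (PySem.List.enumerate (pvBinPadded p.1 n)).foldl pvStep bl0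
    let bl2 := (PySem.List.enumerate (pvBinPadded p.2 n)).foldl pvStep bl1
    -- ''.join of one-char strings
    answer ++ [String.mk (bl2.map (fun d => if d then '#' else ' '))]) []

-- ===== PORT B =====
-- (a | b) >> (n - 1 - i) & 1 : the shift amount n-1-i is ≥ 0 for every i in range(n)
def solution_alt (n : Int) (arr1 : List Int) (arr2 : List Int) : List String :=
  (List.zip arr1 arr2).map (fun p =>
    String.mk ((PySem.List.pyRange 0 n 1).map (fun i =>
      if PySem.Int.band ((PySem.Int.bor p.1 p.2) >>> (n - 1 - i).toNat) 1 ≠ 0 then '#' else ' ')))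

-- ===== PRECONDITION & SPEC =====
-- Pre_ excludes pairs containing a negative entry (A raises ValueError on the '-'/'b'
-- characters of bin()) or an entry of n or more bits (A indexes its length-n row buffer
-- past the end: IndexError on most such inputs, and where every set bit happens to land
-- in range A returns an accidental top-bits row that neither behaviour specifies
-- (that accidental row can coincide with B's low-bits row, e.g. n=1, arr1=[2], arr2=[1]).
def Pre_solution (n : Int) (arr1 : List Int) (arr2 : List Int) : Prop :=
  ∀ p ∈ List.zip arr1 arr2,
    0 ≤ p.1 ∧ p.1.toNat.size ≤ n.toNat ∧ 0 ≤ p.2 ∧ p.2.toNat.size ≤ n.toNat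

instance (n : Int) (arr1 : List Int) (arr2 : List Int) : Decidable (Pre_solution n arr1 arr2) := by
  unfold Pre_solution; infer_instance

def pvWitness_solution : Int × List Int × List Int := (3, [1, 5], [4, 2])

def Spec_solution (n : Int) (arr1 : List Int) (arr2 : List Int) (out : List String) : Prop :=
  out = solution_alt n arr1 arr2
instance (n : Int) (arr1 : List Int) (arr2 : List Int) (out : List String) : Decidable (Spec_solution n arr1 arr2 out) := by unfold Spec_solution; infer_instance

-- ===== CLAIM (what is proved, stated in full; the proofs are below) =====
def Claim_equal_solution : Prop := ∀ (n : Int) (arr1 : List Int) (arr2 : List Int), Dom_solution n arr1 arr2 → Pre_solution n arr1 arr2 → Spec_solution n arr1 arr2 (solution n arr1 arr2)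

-- ===== LEMMAS AND PROOFS =====

-- reference binary writer: MSB first, bin(0) = "0"
def pvBin (m : Nat) : List Char :=
  if m < 2 then [Nat.digitChar m] else pvBin (m / 2) ++ [Nat.digitChar (m % 2)]
decreasing_by exact Nat.div_lt_self (by omega) (by omega)

theorem pv_toDigitsCore_eq (fuel : Nat) : ∀ (m : Nat) (ds : List Char),
    0 < fuel → m < 2 ^ fuel → Nat.toDigitsCore 2 fuel m ds = pvBin m ++ ds := by
  induction fuel with
  | zero => intro m ds hf _; omega
  | succ f ih =>
    intro m ds _ h
    rw [Nat.toDigitsCore]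
    by_cases h2 : m / 2 = 0
    · rw [if_pos h2, pvBin]
      have hm : m < 2 := by omega
      rw [if_pos hm]
      have : m % 2 = m := Nat.mod_eq_of_lt hm
      simp [this]
    · have hm2 : 2 ≤ m := by omega
      have hf : 0 < f := by
        rcases Nat.eq_zero_or_pos f with h0 | h0
        · subst h0; simp [pow_succ] at h; omega
        · exact h0
      rw [if_neg h2, ih (m / 2) _ hf (by rw [pow_succ] at h; omega)]
      conv_rhs => rw [pvBin]
      rw [if_neg (by omega)]
      simp

theorem pv_toDigits_eq (m : Nat) : Nat.toDigits 2 m = pvBin m := by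
  have : m < 2 ^ (m + 1) := by
    calc m < m + 1 := by omega
    _ ≤ 2 ^ (m+1) := (Nat.lt_two_pow_self).le
  simpa using pv_toDigitsCore_eq (m + 1) m [] (by omega) this

def pvLen (m : Nat) : Nat := max 1 m.size

theorem pv_size_div2 (m : Nat) (h : 0 < m) : m.size = (m / 2).size + 1 := by
  have hb := Nat.bit_decide_mod_two_eq_one_shiftRight_one m
  rw [Nat.shiftRight_one] at hb
  have := Nat.size_bit (b := decide (m % 2 = 1)) (n := m / 2) (by rw [hb]; omega)
  rw [hb] at this
  omega

theorem pvBin_spec (m : Nat) :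
    pvBin m = (List.range (pvLen m)).map (fun j => if m.testBit (pvLen m - 1 - j) then '1' else '0') := by
  induction m using Nat.strong_induction_on with
  | _ m ih =>
    by_cases hm : m < 2
    · interval_cases m <;> simp [pvBin, pvLen] <;> decide
    · rw [pvBin, if_neg hm]
      have h2 : 0 < m / 2 := by omega
      have hsz : m.size = (m / 2).size + 1 := pv_size_div2 m (by omega)
      have hL2 : pvLen (m / 2) = (m / 2).size := by
        have : 0 < (m / 2).size := Nat.size_pos.mpr h2
        unfold pvLen; omega
      have hL : pvLen m = pvLen (m / 2) + 1 := by
        unfold pvLen at hL2 ⊢; omega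
      rw [ih (m / 2) (by omega), hL, List.range_add]
      simp only [List.map_append, List.map_map]
      congr 1
      · apply List.map_congr_left
        intro j hj
        rw [List.mem_range] at hj
        have h1 : pvLen (m/2) + 1 - 1 - j = (pvLen (m/2) - 1 - j) + 1 := by omega
        rw [h1, Nat.testBit_succ]
      · have : m.testBit 0 = decide (m % 2 = 1) := Nat.testBit_zero m
        simp only [List.range_one, List.map_cons, List.map_nil, Function.comp_apply]
        have harith : pvLen (m/2) + 1 - 1 - (pvLen (m/2) + 0) = 0 := by omega
        rw [harith]
        have hmod : m % 2 = 0 ∨ m % 2 = 1 := by omega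
        rcases hmod with h | h <;> simp [this, h] <;> decide



theorem pv_toBin_drop (x : Int) (hx : 0 ≤ x) :
    PySem.List.slice (PySem.Int.toBinChars0b x) (some 2) none = pvBin x.toNat := by
  rw [PySem.List.slice_from _ (by omega : (0:Int) ≤ 2)]
  unfold PySem.Int.toBinChars0b
  rw [if_neg (by omega)]
  simp [pv_toDigits_eq]

theorem pvBinPadded_eq (x : Int) (n : Int) (hx : 0 ≤ x) (hsz : x.toNat.size ≤ n.toNat) (hn : 1 ≤ n.toNat) :
    pvBinPadded x n = (List.range n.toNat).map
      (fun j => if x.toNat.testBit (n.toNat - 1 - j) then '1' else '0') := by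
  set m := x.toNat with hm
  set N := n.toNat with hN
  have hlen : (pvBin m).length = pvLen m := by
    rw [pvBin_spec]; simp
  have hLle : pvLen m ≤ N := by
    unfold pvLen; omega
  unfold pvBinPadded pvRjust
  rw [pv_toBin_drop x hx, ← hm, hlen, pvBin_spec]
  have hsplit : N = (N - pvLen m) + pvLen m := by omega
  rw [hsplit, List.range_add, List.map_append]
  congr 1
  · symm
    rw [List.eq_replicate_iff]
    refine ⟨by simp; omega, ?_⟩
    · intro c hc
      rw [List.mem_map] at hc
      obtain ⟨j, hj, hcj⟩ := hc
      rw [List.mem_range] at hj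
      have hbit : m.testBit (N - pvLen m + pvLen m - 1 - j) = false := by
        apply Nat.testBit_eq_false_of_lt
        apply lt_of_lt_of_le (Nat.lt_size_self m)
        apply Nat.pow_le_pow_right (by omega)
        unfold pvLen at *; omega
      rw [hbit] at hcj
      simpa using hcj.symm
  · rw [List.map_map]
    apply List.map_congr_left
    intro j hj
    rw [List.mem_range] at hj
    simp only [Function.comp_apply]
    have : N - pvLen m + pvLen m - 1 - (N - pvLen m + j) = pvLen m - 1 - j := by omega
    rw [this]


theorem pv_fold_getElem? (l : List (Int × Char)) (hpos : ∀ p ∈ l, 0 ≤ p.1) :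
    ∀ (bl : List Bool) (j : Nat),
    (l.foldl pvStep bl)[j]? =
      (bl[j]?).map (fun b => b || l.any (fun p => p.1 == (j : Int) && decide (p.2 ≠ '0'))) := by
  induction l with
  | nil => intro bl j; cases h : bl[j]? <;> simp [h]
  | cons q l ih =>
    intro bl j
    have hq : 0 ≤ q.1 := hpos q (by simp)
    have hl : ∀ p ∈ l, 0 ≤ p.1 := fun p hp => hpos p (by simp [hp])
    simp only [List.foldl_cons, List.any_cons]
    rw [ih hl]
    unfold pvStep
    by_cases hc : q.2 ≠ '0'
    · rw [if_pos hc]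
      by_cases hij : q.1.toNat = j
      · have hbeq : (q.1 == (j : Int)) = true := by
          rw [beq_iff_eq]; omega
        rw [List.getElem?_set]
        rw [if_pos hij]
        by_cases hlt : q.1.toNat < bl.length
        · rw [if_pos hlt]
          have hjlen : j < bl.length := by omega
          rw [List.getElem?_eq_getElem hjlen]
          simp [hbeq, hc]
        · rw [if_neg hlt]
          have : bl[j]? = none := by
            rw [List.getElem?_eq_none_iff]; omega
          rw [this]; simp
      · rw [List.getElem?_set, if_neg hij]
        have hbeq : (q.1 == (j : Int)) = false := by
          rw [beq_eq_false_iff_ne]; omega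
        simp [hbeq]
    · rw [if_neg hc]
      have : decide (q.2 ≠ '0') = false := by simpa using hc
      simp [this]

theorem pv_any_enum_map (N j : Nat) (f : Nat → Bool) (hj : j < N) :
    ((PySem.List.enumerate ((List.range N).map (fun k => if f k then '1' else '0'))).any
      (fun p => p.1 == (j : Int) && decide (p.2 ≠ '0'))) = f j := by
  cases hf : f j
  · apply List.any_eq_false.mpr
    intro p hp
    rw [PySem.List.mem_enumerate_iff] at hp
    obtain ⟨k, hk, hpk⟩ := hp
    subst hpk
    simp only [List.getElem_map, List.getElem_range] at *
    by_cases hkj : k = j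
    · subst hkj
      simp [hf]
    · have : ((0 + (k:Int)) == (j:Int)) = false := by
        rw [beq_eq_false_iff_ne]; omega
      simp [hkj]
  · apply List.any_eq_true.mpr
    refine ⟨((j : Int), '1'), ?_, ?_⟩
    · rw [PySem.List.mem_enumerate_iff]
      refine ⟨j, by simpa using hj, ?_⟩
      simp [hf]
    · simp

theorem pv_band_bit (x k : Nat) :
    (PySem.Int.band (((x : Int)) >>> k) 1 ≠ 0) ↔ x.testBit k = true := by
  rw [← Int.natCast_shiftRight]
  rw [(by norm_num : (1:Int) = ((1:Nat):Int)), PySem.Int.band_natCast]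
  rw [Nat.and_one_is_mod, Nat.testBit_eq_decide_div_mod_eq, Nat.shiftRight_eq_div_pow]
  have h2 : x / 2 ^ k % 2 < 2 := Nat.mod_lt _ (by omega)
  generalize x / 2 ^ k % 2 = m at *
  constructor
  · intro h; simp at h ⊢; omega
  · intro h; simp at h ⊢; omega

theorem pv_enum_pos (xs : List Char) : ∀ p ∈ PySem.List.enumerate xs 0, 0 ≤ p.1 := by
  intro p hp
  rw [PySem.List.mem_enumerate_iff] at hp
  obtain ⟨k, hk, hpk⟩ := hp
  subst hpk
  simp

theorem pv_row_eq (n a b : Int) (ha : 0 ≤ a) (hsa : a.toNat.size ≤ n.toNat)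
    (hb : 0 ≤ b) (hsb : b.toNat.size ≤ n.toNat) :
    ((PySem.List.enumerate (pvBinPadded b n)).foldl pvStep
      ((PySem.List.enumerate (pvBinPadded a n)).foldl pvStep
        (List.replicate n.toNat false))).map (fun d => if d then '#' else ' ')
    = (PySem.List.pyRange 0 n 1).map (fun i =>
        if PySem.Int.band ((PySem.Int.bor a b) >>> (n - 1 - i).toNat) 1 ≠ 0 then '#' else ' ') := by
  by_cases hN0 : n.toNat = 0
  · have haz : a = 0 := by
      have := Nat.size_eq_zero.mp (by omega : a.toNat.size = 0); omega
    have hbz : b = 0 := by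
      have := Nat.size_eq_zero.mp (by omega : b.toNat.size = 0); omega
    subst haz hbz
    have hpad : pvBinPadded 0 n = ['0'] := by
      unfold pvBinPadded pvRjust
      rw [pv_toBin_drop 0 le_rfl]
      rw [pvBin]
      norm_num
      have h1 : n.toNat - 1 = 0 := by omega
      rw [h1]
      simp
      decide
    rw [hpad, hN0]
    rw [PySem.List.pyRange_one]
    have : (n - 0).toNat = 0 := by omega
    rw [this]
    simp [PySem.List.enumerate_cons, PySem.List.enumerate_nil, pvStep]
  · have hn1 : 1 ≤ n.toNat := by omega
    rw [pvBinPadded_eq a n ha hsa hn1, pvBinPadded_eq b n hb hsb hn1]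
    apply List.ext_getElem?
    intro j
    rw [List.getElem?_map, List.getElem?_map]
    rw [pv_fold_getElem? _ (pv_enum_pos _), pv_fold_getElem? _ (pv_enum_pos _)]
    rw [PySem.List.pyRange_one]
    have hsub : ((n : Int) - 0).toNat = n.toNat := by omega
    rw [hsub]
    by_cases hj : j < n.toNat
    · rw [List.getElem?_replicate, if_pos hj]
      rw [List.getElem?_map, List.getElem?_range hj]
      simp only [Option.map_some]
      rw [pv_any_enum_map n.toNat j _ hj, pv_any_enum_map n.toNat j _ hj]
      have hk : ((n : Int) - 1 - (0 + (j : Int))).toNat = n.toNat - 1 - j := by omega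
      rw [PySem.Int.bor_of_nonneg ha hb, hk]
      have hor : (a.toNat ||| b.toNat).testBit (n.toNat - 1 - j)
          = (a.toNat.testBit (n.toNat - 1 - j) || b.toNat.testBit (n.toNat - 1 - j)) :=
        Nat.testBit_lor _ _ _
      by_cases hcond : PySem.Int.band (((a.toNat ||| b.toNat : Nat) : Int) >>> (n.toNat - 1 - j)) 1 ≠ 0
      · have := (pv_band_bit _ _).mp hcond
        rw [hor] at this
        simp [hcond, this]
      · have := hcond
        rw [pv_band_bit] at this
        rw [hor] at this
        simp only [Bool.or_eq_true, not_or] at this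
        simp [hcond]
        simp at this
        simp [this.1, this.2]
    · rw [List.getElem?_replicate, if_neg hj]
      rw [List.getElem?_eq_none_iff.mpr (by simpa using hj)]
      simp

theorem pv_foldl_append {α β : Type} (g : α → β) :
    ∀ (l : List α) (acc : List β), l.foldl (fun ans p => ans ++ [g p]) acc = acc ++ l.map g := by
  intro l
  induction l with
  | nil => simp
  | cons x xs ih => intro acc; simp [ih]

-- ===== VERDICT (by name: the statement is the Claim_ definition above) =====
theorem solution_spec : Claim_equal_solution := by
  intro n arr1 arr2 _ hpre
  unfold Spec_solution solution solution_alt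
  rw [pv_foldl_append]
  simp only [List.nil_append]
  apply List.map_congr_left
  intro p hp
  obtain ⟨ha, hsa, hb, hsb⟩ := hpre p hp
  exact congrArg String.mk (pv_row_eq n p.1 p.2 ha hsa hb hsb)
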